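-- pv_equiv track=rewrite | github.com/alexgao2/huffman-verified | wrapper.py | check_prefix_free
-- ===== SOURCE A (Python) =====
-- def is_prefix(a, b):
--     return len(a) <= len(b) and b[:len(a)] == a
--
-- def check_prefix_free(codes):
--     items = list(codes.items())
--     for i in range(len(items)):
--         s1, c1 = items[i]
--         for j in range(len(items)):
--             if i == j:
--                 continue
--             s2, c2 = items[j]
--             if is_prefix(c1, c2):
--                 return False, (s1, c1, s2, c2)
--     return True, None
-- ===== SOURCE B (Python) =====
-- def check_prefix_free(codes):
--     items = list(codes.items())
--     pref = {}
--     for j, (s, c) in enumerate(items):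
--         for k in range(len(c) + 1):
--             p = c[:k]
--             lst = pref.get(p, [])
--             if len(lst) < 2:
--                 pref[p] = lst + [(j, s, c)]
--     for i, (s1, c1) in enumerate(items):
--         for (j, s2, c2) in pref.get(c1, []):
--             if j != i:
--                 return False, (s1, c1, s2, c2)
--     return True, None
-- ===== Notes on version B (the rewrite author's own statement) =====
-- stated objective: alternative
-- what changed: Replaces A's all-pairs prefix scan (for every pair i,j test is_prefix) with a one-pass prefix index: a dict mapping every prefix of every codeword to the first two items carrying it, then a single lookup per item; the inner scan over all j disappears. Not measurably faster: A exits early on typical inputs.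
import Mathlib
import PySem

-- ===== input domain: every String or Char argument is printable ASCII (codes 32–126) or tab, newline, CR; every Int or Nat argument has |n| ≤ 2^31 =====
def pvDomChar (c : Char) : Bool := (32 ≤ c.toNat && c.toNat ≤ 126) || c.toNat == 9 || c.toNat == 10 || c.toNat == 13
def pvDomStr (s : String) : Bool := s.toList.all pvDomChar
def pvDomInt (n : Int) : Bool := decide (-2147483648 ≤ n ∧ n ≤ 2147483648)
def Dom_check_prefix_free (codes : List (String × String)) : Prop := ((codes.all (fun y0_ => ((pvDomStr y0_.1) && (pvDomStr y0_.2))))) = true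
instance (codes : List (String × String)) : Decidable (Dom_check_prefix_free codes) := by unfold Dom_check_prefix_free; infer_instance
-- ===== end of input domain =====

-- B replaces A's all-pairs scan by a one-pass prefix index (dict of codeword prefixes,
-- each keyed to the first two items carrying it), then one lookup per item; same result.

-- ===== PORT A =====
-- is_prefix(a, b) = len(a) <= len(b) and b[:len(a)] == a
def pyIsPrefix (a b : String) : Bool :=
  decide (a.toList.length ≤ b.toList.length) &&
    (PySem.List.slice b.toList none (some (a.toList.length : Int)) == a.toList)

-- inner 'for j in range(len(items))' over enumerate(items)
def cpfInnerA (i : Int) (s1 c1 : String) :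
    List (Int × String × String) → Option (String × String × String × String)
  | [] => none
  | (j, s2, c2) :: rest =>
    if i == j then cpfInnerA i s1 c1 rest
    else if pyIsPrefix c1 c2 then some (s1, c1, s2, c2)
    else cpfInnerA i s1 c1 rest

-- outer 'for i in range(len(items))' over enumerate(items)
def cpfOuterA (items : List (String × String)) :
    List (Int × String × String) → Bool × Option (String × String × String × String)
  | [] => (true, none)
  | (i, s1, c1) :: rest =>
    match cpfInnerA i s1 c1 (PySem.List.enumerate items 0) with
    | some w => (false, some w)
    | none => cpfOuterA items rest

def check_prefix_free (codes : List (String × String)) :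
    Bool × (Option (String × String × String × String)) :=
  cpfOuterA codes (PySem.List.enumerate codes 0)

-- ===== PORT B =====
-- build the prefix index: for each (j,(s,c)), for k in range(len(c)+1), extend pref[c[:k]] while < 2 entries
def cpfBuild (items : List (Int × String × String)) :
    PySem.Dict String (List (Int × String × String)) :=
  items.foldl (fun d e =>
    (List.range (e.2.2.toList.length + 1)).foldl (fun d k =>
      let p := String.ofList (e.2.2.toList.take k)
      let lst := d.getD p []
      if lst.length < 2 then d.insert p (lst ++ [e]) else d) d)
    PySem.Dict.empty

-- query pass: for (i,(s1,c1)) in enumerate(items): first entry of pref.get(c1,[]) with index ≠ i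
def cpfQueryB (pref : PySem.Dict String (List (Int × String × String))) :
    List (Int × String × String) → Bool × Option (String × String × String × String)
  | [] => (true, none)
  | (i, s1, c1) :: rest =>
    match (pref.getD c1 []).find? (fun e => e.1 != i) with
    | some (_, s2, c2) => (false, some (s1, c1, s2, c2))
    | none => cpfQueryB pref rest

def check_prefix_free_alt (codes : List (String × String)) :
    Bool × (Option (String × String × String × String)) :=
  let items := PySem.List.enumerate codes 0
  cpfQueryB (cpfBuild items) items

-- ===== PRECONDITION & SPEC =====
def Spec_check_prefix_free (codes : List (String × String)) (out : Bool × (Option (String × String × String × String))) : Prop := out = check_prefix_free_alt codes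
instance (codes : List (String × String)) (out : Bool × (Option (String × String × String × String))) : Decidable (Spec_check_prefix_free codes out) := by unfold Spec_check_prefix_free; infer_instance

-- ===== CLAIM (what is proved, stated in full; the proofs are below) =====
def Claim_equal_check_prefix_free : Prop := ∀ (codes : List (String × String)), Dom_check_prefix_free codes → Spec_check_prefix_free codes (check_prefix_free codes)

-- ===== LEMMAS AND PROOFS =====

-- pyIsPrefix decides list-prefix
theorem pyIsPrefix_iff (a b : String) : pyIsPrefix a b = true ↔ a.toList <+: b.toList := by
  unfold pyIsPrefix
  rw [PySem.List.slice_to_natCast]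
  simp only [Bool.and_eq_true, decide_eq_true_eq, beq_iff_eq]
  constructor
  · rintro ⟨_, h⟩; exact h ▸ List.take_prefix _ _
  · intro h; exact ⟨h.length_le, List.prefix_iff_eq_take.mp h |>.symm⟩

-- one dict-update step used by the build
def cpfUpd (e : Int × String × String) (l : List (Int × String × String)) :
    List (Int × String × String) :=
  if l.length < 2 then l ++ [e] else l

-- folding the update over a Nodup list of keys touches each key once
theorem foldl_upd_getD (e : Int × String × String) (qs : List String) (hnd : qs.Nodup)
    (d : PySem.Dict String (List (Int × String × String))) (p : String) :
    (qs.foldl (fun d q =>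
        let lst := d.getD q []
        if lst.length < 2 then d.insert q (lst ++ [e]) else d) d).getD p []
      = if p ∈ qs then cpfUpd e (d.getD p []) else d.getD p [] := by
  induction qs generalizing d with
  | nil => simp
  | cons q qs ih =>
    simp only [List.foldl_cons]
    rw [ih (List.nodup_cons.mp hnd).2]
    by_cases hpq : p = q
    · subst hpq
      have hnp : p ∉ qs := (List.nodup_cons.mp hnd).1
      simp only [hnp, if_false, List.mem_cons, true_or, if_true, cpfUpd]
      split_ifs with h
      · simp
      · rfl
    · have : ((let lst := d.getD q []
          if lst.length < 2 then d.insert q (lst ++ [e]) else d) : PySem.Dict String _).getD p []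
            = d.getD p [] := by
        simp only []
        split_ifs with h
        · rw [PySem.Dict.getD_insert]; simp [hpq]
        · rfl
      rw [this]
      simp [List.mem_cons, hpq]

-- membership in the generated prefix keys = list-prefix
theorem mem_prefix_keys (p : String) (c : String) :
    p ∈ (List.range (c.toList.length + 1)).map (fun k => String.ofList (c.toList.take k))
      ↔ p.toList <+: c.toList := by
  simp only [List.mem_map, List.mem_range]
  constructor
  · rintro ⟨k, _, rfl⟩
    simpa using List.take_prefix k c.toList
  · intro h
    refine ⟨p.toList.length, by have := h.length_le; omega, ?_⟩
    rw [← List.prefix_iff_eq_take.mp h]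
    simp

theorem nodup_prefix_keys (c : String) :
    ((List.range (c.toList.length + 1)).map (fun k => String.ofList (c.toList.take k))).Nodup := by
  apply List.Nodup.map_on _ (List.nodup_range)
  intro i hi j hj hij
  simp only [List.mem_range] at hi hj
  have h2 : c.toList.take i = c.toList.take j := by
    have := congrArg String.toList hij
    simpa using this
  have : (c.toList.take i).length = (c.toList.take j).length := by rw [h2]
  rw [List.length_take, List.length_take] at this
  omega

-- take 2 absorbs the conditional append used by the build
theorem take2_upd (f : List (Int × String × String)) (e : Int × String × String) :
    cpfUpd e (f.take 2) = (f ++ [e]).take 2 := by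
  match f with
  | [] => rfl
  | [a] => rfl
  | a :: b :: rest => simp [cpfUpd, List.take]

-- the built dict characterised: first two items whose code extends p
theorem cpfBuild_getD (l : List (Int × String × String))
    (d : PySem.Dict String (List (Int × String × String)))
    (proc : List (Int × String × String))
    (h : ∀ p : String, d.getD p [] = (proc.filter (fun e => pyIsPrefix p e.2.2)).take 2)
    (p : String) :
    (l.foldl (fun d e =>
      (List.range (e.2.2.toList.length + 1)).foldl (fun d k =>
        let p := String.ofList (e.2.2.toList.take k)
        let lst := d.getD p []
        if lst.length < 2 then d.insert p (lst ++ [e]) else d) d) d).getD p []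
      = ((proc ++ l).filter (fun e => pyIsPrefix p e.2.2)).take 2 := by
  induction l generalizing d proc with
  | nil => simpa using h p
  | cons e l ih =>
    simp only [List.foldl_cons]
    have hstep : ∀ p : String,
        ((List.range (e.2.2.toList.length + 1)).foldl (fun d k =>
          let p := String.ofList (e.2.2.toList.take k)
          let lst := d.getD p []
          if lst.length < 2 then d.insert p (lst ++ [e]) else d) d).getD p []
        = ((proc ++ [e]).filter (fun e' => pyIsPrefix p e'.2.2)).take 2 := by
      intro p
      have hfold := foldl_upd_getD e
        ((List.range (e.2.2.toList.length + 1)).map (fun k => String.ofList (e.2.2.toList.take k)))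
        (nodup_prefix_keys e.2.2) d p
      rw [List.foldl_map] at hfold
      rw [hfold, h p, List.filter_append, List.filter_cons]
      by_cases hpre : pyIsPrefix p e.2.2 = true
      · have hmem : p ∈ (List.range (e.2.2.toList.length + 1)).map
            (fun k => String.ofList (e.2.2.toList.take k)) :=
          (mem_prefix_keys p e.2.2).mpr ((pyIsPrefix_iff p e.2.2).mp hpre)
        simp only [hmem, if_true, hpre, List.filter_nil]
        exact take2_upd _ e
      · have hmem : p ∉ (List.range (e.2.2.toList.length + 1)).map
            (fun k => String.ofList (e.2.2.toList.take k)) := fun hm =>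
          hpre ((pyIsPrefix_iff p e.2.2).mpr ((mem_prefix_keys p e.2.2).mp hm))
        rw [if_neg hmem]
        simp [hpre]
    have := ih _ (proc ++ [e]) hstep
    rw [this, List.append_assoc]
    simp

-- find? with the index test sees only the first two entries when first components are pairwise distinct
theorem find?_take_two (i : Int) (l : List (Int × String × String))
    (hp : l.Pairwise (fun a b => a.1 ≠ b.1)) :
    (l.take 2).find? (fun e => e.1 != i) = l.find? (fun e => e.1 != i) := by
  match l with
  | [] => rfl
  | [a] => rfl
  | a :: b :: rest =>
    by_cases ha : (a.1 != i) = true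
    · simp [List.find?, ha]
    · have hab : a.1 ≠ b.1 := (List.pairwise_cons.mp hp).1 b (by simp)
      have hai : a.1 = i := by simpa using ha
      have hb : (b.1 != i) = true := by simp [← hai, bne_iff_ne, Ne.symm hab ]
      simp [List.find?, ha, hb]

-- A's inner loop as a find? over the filtered list
theorem cpfInnerA_eq (i : Int) (s1 c1 : String) (l : List (Int × String × String)) :
    cpfInnerA i s1 c1 l
      = ((l.filter (fun e => pyIsPrefix c1 e.2.2)).find? (fun e => e.1 != i)).map
          (fun e => (s1, c1, e.2.1, e.2.2)) := by
  induction l with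
  | nil => rfl
  | cons e l ih =>
    obtain ⟨j, s2, c2⟩ := e
    rw [List.filter_cons]
    by_cases hij : i = j
    · subst hij
      have h1 : ((i : Int) == i) = true := by simp
      have hji : (((i, s2, c2) : Int × String × String).1 != i) = false := by simp
      simp only [cpfInnerA, h1, if_true]
      split_ifs with hpre
      · rw [ih]
        simp [List.find?]
      · exact ih
    · have h1 : ((i : Int) == j) = false := by simp [hij]
      have hji : (((j, s2, c2) : Int × String × String).1 != i) = true := by
        simp [bne_iff_ne]
        exact Ne.symm hij
      simp only [cpfInnerA, h1, Bool.false_eq_true, if_false]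
      split_ifs with hpre
      · simp [List.find?, hji]
      · exact ih

-- the filtered enumerate has pairwise-distinct indices
theorem pairwise_filter_enumerate (codes : List (String × String)) (q : Int × String × String → Bool) :
    ((PySem.List.enumerate codes 0).filter q).Pairwise (fun a b => a.1 ≠ b.1) := by
  have h := PySem.List.pairwise_lt_enumerate (xs := codes) (s := 0)
  exact (h.filter q).imp (fun hlt => ne_of_lt hlt)

-- outer loops agree step by step
theorem outer_eq (codes : List (String × String)) (rest : List (Int × String × String)) :
    cpfOuterA codes rest = cpfQueryB (cpfBuild (PySem.List.enumerate codes 0)) rest := by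
  induction rest with
  | nil => rfl
  | cons e rest ih =>
    obtain ⟨i, s1, c1⟩ := e
    simp only [cpfOuterA, cpfQueryB]
    have hdict : (cpfBuild (PySem.List.enumerate codes 0)).getD c1 []
        = ((PySem.List.enumerate codes 0).filter (fun e => pyIsPrefix c1 e.2.2)).take 2 := by
      unfold cpfBuild
      have := cpfBuild_getD (PySem.List.enumerate codes 0) PySem.Dict.empty []
        (by intro p; simp [PySem.Dict.getD_empty]) c1
      simpa using this
    rw [hdict, find?_take_two i _ (pairwise_filter_enumerate codes _), cpfInnerA_eq]
    rcases hfind : ((PySem.List.enumerate codes 0).filter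
        (fun e => pyIsPrefix c1 e.2.2)).find? (fun e => e.1 != i) with _ | ⟨j, s2, c2⟩
    · rw [hfind]
      exact ih
    · rw [hfind]
      rfl

-- ===== VERDICT (by name: the statement is the Claim_ definition above) =====
theorem check_prefix_free_spec : Claim_equal_check_prefix_free := by
  intro codes _
  unfold Spec_check_prefix_free check_prefix_free check_prefix_free_alt
  exact outer_eq codes _
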